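-- pv_equiv track=rewrite | github.com/pakx2206/pp1 | 09-Test2/p2.py | f
-- ===== SOURCE A (Python) =====
-- def f(human_age):
--     n = human_age
--     sum=0
--     while n>0:
--         if n>2:
--             sum+=4
--             n-=1
--         else:
--             sum+=10
--             n-=1
--     return sum
-- ===== SOURCE B (Python) =====
-- def f(human_age):
--     # Closed form: steps with n>2 contribute 4 each (n-2 of them when n>2),
--     # steps with n in {1,2} contribute 10 each.
--     if human_age <= 0:
--         return 0
--     if human_age <= 2:
--         return 10 * human_age
--     return 4 * human_age + 12
-- ===== Notes on version B (the rewrite author's own statement) =====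
-- stated objective: faster
-- what changed: Replaced the per-step countdown loop with a closed-form case formula (0, 10*n, or 4*n+12).
import Mathlib
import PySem

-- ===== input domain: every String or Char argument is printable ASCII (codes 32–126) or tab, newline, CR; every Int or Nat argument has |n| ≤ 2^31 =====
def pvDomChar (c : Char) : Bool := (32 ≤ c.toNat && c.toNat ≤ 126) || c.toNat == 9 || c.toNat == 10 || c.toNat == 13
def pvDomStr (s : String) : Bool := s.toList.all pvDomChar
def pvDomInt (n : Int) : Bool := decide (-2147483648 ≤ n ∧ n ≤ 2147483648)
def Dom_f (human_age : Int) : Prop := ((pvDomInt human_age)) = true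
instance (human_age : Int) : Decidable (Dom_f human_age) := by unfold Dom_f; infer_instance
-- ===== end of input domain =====

-- B replaces A's per-step countdown loop with a closed-form case formula (faster: O(1) vs O(n)).

-- ===== PORT A =====
-- literal transliteration of A's while loop over state (n, sum)
def fLoop (n : Int) (sum : Int) : Int :=
  if _h : n > 0 then
    if n > 2 then fLoop (n - 1) (sum + 4)
    else fLoop (n - 1) (sum + 10)
  else sum
termination_by n.toNat
decreasing_by all_goals omega

def f (human_age : Int) : Int := fLoop human_age 0

-- ===== PORT B =====
def f_alt (human_age : Int) : Int :=
  if human_age ≤ 0 then 0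
  else if human_age ≤ 2 then 10 * human_age
  else 4 * human_age + 12

-- ===== PRECONDITION & SPEC =====
def Spec_f (human_age : Int) (out : Int) : Prop := out = f_alt human_age
instance (human_age : Int) (out : Int) : Decidable (Spec_f human_age out) := by unfold Spec_f; infer_instance

-- ===== CLAIM (what is proved, stated in full; the proofs are below) =====
def Claim_equal_f : Prop := ∀ (human_age : Int), Dom_f human_age → Spec_f human_age (f human_age)

-- ===== LEMMAS AND PROOFS =====
lemma fLoop_closed (k : Nat) : ∀ (n sum : Int), n.toNat = k →
    fLoop n sum = sum + f_alt n := by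
  induction k with
  | zero =>
    intro n sum h
    have hn : ¬ n > 0 := by omega
    rw [fLoop]
    simp [hn, f_alt, show n ≤ 0 by omega]
  | succ k ih =>
    intro n sum h
    have hn : n > 0 := by omega
    rw [fLoop]
    simp only [hn, dif_pos]
    by_cases h2 : n > 2
    · rw [ih (n - 1) (sum + 4) (by omega)]
      simp only [f_alt]
      split_ifs <;> omega
    · rw [ih (n - 1) (sum + 10) (by omega)]
      simp only [f_alt]
      split_ifs <;> omega

-- ===== VERDICT (by name: the statement is the Claim_ definition above) =====
theorem f_spec : Claim_equal_f := by
  intro n _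
  unfold Spec_f f
  have := fLoop_closed n.toNat n 0 rfl
  omega
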